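-- pv_equiv track=rewrite | github.com/atulvarshneya/quantum-computing | qusimulator/qsim/DMQsim.py | __valid_bit_list
-- ===== SOURCE A (Python) =====
-- def __valid_bit_list(bit_list,nbits):
-- 	if len(bit_list) > nbits:
-- 		return False
-- 	for i in bit_list:
-- 		if i >= nbits:
-- 			return False
-- 		if bit_list.count(i) != 1:
-- 			return False
-- 	return True
-- ===== SOURCE B (Python) =====
-- def __valid_bit_list(bit_list, nbits):
--     # Sort-then-scan: after sorting, duplicates are adjacent, and the last
--     # element is the maximum, so one pass over neighbours decides everything.
--     if len(bit_list) > nbits: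
--         return False
--     s = sorted(bit_list)
--     for a, b in zip(s, s[1:]):
--         if a == b:
--             return False
--     return not s or s[-1] < nbits
-- ===== Notes on version B (the rewrite author's own statement) =====
-- stated objective: alternative
-- what changed: Sort-then-scan: B sorts the list once, rejects duplicates by comparing adjacent neighbours of the sorted list, and checks the range bound only on the sorted maximum (the last element), replacing A's per-element full-list .count rescans.
import Mathlib
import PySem

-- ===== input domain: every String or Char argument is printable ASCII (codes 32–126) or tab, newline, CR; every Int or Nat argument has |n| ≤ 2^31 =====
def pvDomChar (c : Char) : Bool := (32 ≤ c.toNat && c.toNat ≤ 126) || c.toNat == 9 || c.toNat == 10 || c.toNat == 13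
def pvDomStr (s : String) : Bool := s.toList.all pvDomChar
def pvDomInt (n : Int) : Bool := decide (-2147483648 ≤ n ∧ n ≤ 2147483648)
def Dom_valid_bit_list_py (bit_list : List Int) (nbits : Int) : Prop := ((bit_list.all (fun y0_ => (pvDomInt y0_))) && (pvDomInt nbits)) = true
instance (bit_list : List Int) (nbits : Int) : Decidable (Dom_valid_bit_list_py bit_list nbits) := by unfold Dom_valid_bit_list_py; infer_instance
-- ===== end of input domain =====

-- B replaces A's early-return scan with per-element full-list .count rescans by a
-- sort-then-scan: sort once, reject duplicates via adjacent neighbours, range-check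
-- only the sorted maximum (alternative algorithm, same values everywhere).


-- ===== PORT A =====
-- the 'for i in bit_list' loop: early returns on i >= nbits or bit_list.count(i) != 1
def validBitListLoop (full : List Int) (rest : List Int) (nbits : Int) : Bool :=
  match rest with
  | [] => true
  | i :: t =>
    if i ≥ nbits then false
    else if PySem.List.count full i ≠ 1 then false
    else validBitListLoop full t nbits

def valid_bit_list_py (bit_list : List Int) (nbits : Int) : Bool :=
  if (bit_list.length : Int) > nbits then false
  else validBitListLoop bit_list bit_list nbits

-- ===== PORT B =====
-- the 'for a, b in zip(s, s[1:])' loop over adjacent pairs of the sorted list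
def adjDistinctLoop : List Int → Bool
  | a :: b :: t => if a == b then false else adjDistinctLoop (b :: t)
  | _ => true

def valid_bit_list_py_alt (bit_list : List Int) (nbits : Int) : Bool :=
  if (bit_list.length : Int) > nbits then false
  else
    let s := PySem.List.sorted bit_list (fun x => x) false
    adjDistinctLoop s &&
      -- 'not s or s[-1] < nbits'
      (match s.getLast? with
       | none => true
       | some x => decide (x < nbits))

-- ===== PRECONDITION & SPEC =====
def Spec_valid_bit_list_py (bit_list : List Int) (nbits : Int) (out : Bool) : Prop := out = valid_bit_list_py_alt bit_list nbits
instance (bit_list : List Int) (nbits : Int) (out : Bool) : Decidable (Spec_valid_bit_list_py bit_list nbits out) := by unfold Spec_valid_bit_list_py; infer_instance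

-- ===== CLAIM (what is proved, stated in full; the proofs are below) =====
def Claim_equal_valid_bit_list_py : Prop := ∀ (bit_list : List Int) (nbits : Int), Dom_valid_bit_list_py bit_list nbits → Spec_valid_bit_list_py bit_list nbits (valid_bit_list_py bit_list nbits)

-- ===== LEMMAS AND PROOFS =====

-- A's loop is an all() over the remaining elements, counting in the full list
theorem validBitListLoop_eq_all (full rest : List Int) (nbits : Int) :
    validBitListLoop full rest nbits
      = rest.all (fun i => decide (i < nbits) && (PySem.List.count full i == 1)) := by
  induction rest with
  | nil => rfl
  | cons i t ih =>
    simp only [validBitListLoop, List.all_cons, ih]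
    split_ifs with h1 h2
    · simp [not_lt.mpr h1]
    · have hc : List.count i full ≠ 1 := by simpa using h2
      simp [hc]
    · have hc : List.count i full = 1 := by simpa using not_not.1 h2
      simp [lt_of_not_ge h1, hc]

-- the adjacent-pairs scan decides 'no two neighbours equal'
theorem adjDistinctLoop_eq_chain (s : List Int) :
    adjDistinctLoop s = true ↔ List.IsChain (· ≠ ·) s := by
  match s with
  | [] => simp [adjDistinctLoop]
  | [a] => simp [adjDistinctLoop]
  | a :: b :: t =>
    rw [List.isChain_cons]
    constructor
    · intro h
      by_cases hab : a = b
      · simp [adjDistinctLoop, hab] at h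
      · refine ⟨by simpa using hab, (adjDistinctLoop_eq_chain (b :: t)).1 ?_⟩
        simpa [adjDistinctLoop, hab] using h
    · rintro ⟨hab, hc⟩
      have hab' : a ≠ b := by simpa using hab b (by simp)
      simpa [adjDistinctLoop, hab'] using (adjDistinctLoop_eq_chain (b :: t)).2 hc

-- on a ≤-sorted list, adjacent distinctness is exactly Nodup
theorem chain_ne_iff_nodup : ∀ (s : List Int), s.Pairwise (· ≤ ·) →
    (List.IsChain (· ≠ ·) s ↔ s.Nodup)
  | [], _ => by simp
  | a :: t, hpw => by
    obtain ⟨hhead, hpt⟩ := List.pairwise_cons.1 hpw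
    rw [List.isChain_cons, List.nodup_cons, chain_ne_iff_nodup t hpt]
    constructor
    · rintro ⟨hne, hnd⟩
      refine ⟨fun ha => ?_, hnd⟩
      match t, ha, hne, hhead, hpt with
      | b :: t', ha, hne, hhead, hpt =>
        have hab : a ≠ b := by simpa using hne b (by simp)
        rcases List.mem_cons.1 ha with rfl | ha'
        · exact hab rfl
        · have h1 : a ≤ b := hhead b (by simp)
          have h2 : b ≤ a := (List.pairwise_cons.1 hpt).1 a ha'
          exact hab (le_antisymm h1 h2)
    · rintro ⟨hnotin, hnd⟩
      refine ⟨fun y hy => fun hay => ?_, hnd⟩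
      subst hay
      exact hnotin (List.mem_of_mem_head? hy)

-- on a ≤-sorted list the last element is the maximum
theorem le_getLast : ∀ (s : List Int), s.Pairwise (· ≤ ·) → ∀ (m : Int),
    s.getLast? = some m → ∀ x ∈ s, x ≤ m
  | [], _, m, hm => by simp at hm
  | a :: t, hpw, m, hm => by
    obtain ⟨hhead, hpt⟩ := List.pairwise_cons.1 hpw
    match t, hm, hhead, hpt with
    | [], hm, _, _ =>
      intro x hx
      simp only [List.getLast?_singleton] at hm
      injection hm with hm
      simp only [List.mem_singleton] at hx
      omega
    | b :: t', hm, hhead, hpt =>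
      intro x hx
      have hm' : (b :: t').getLast? = some m := by
        rw [List.getLast?_cons_cons] at hm
        exact hm
      have hmem : m ∈ b :: t' := List.mem_of_getLast? hm'
      rcases List.mem_cons.1 hx with rfl | hx'
      · exact hhead m hmem
      · exact le_getLast (b :: t') hpt m hm' x hx'

-- on a ≤-sorted list, 'empty or last < nbits' is exactly 'all elements < nbits'
theorem last_lt_iff_forall (s : List Int) (hpw : s.Pairwise (· ≤ ·)) (nbits : Int) :
    (match s.getLast? with
     | none => true
     | some x => decide (x < nbits)) = true ↔ ∀ x ∈ s, x < nbits := by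
  cases hs : s.getLast? with
  | none =>
    rw [List.getLast?_eq_none_iff] at hs
    simp [hs]
  | some m =>
    have hm : m ∈ s := List.mem_of_getLast? hs
    simp only
    constructor
    · intro h x hx
      have hxm : x ≤ m := le_getLast s hpw m hs x hx
      have := of_decide_eq_true h
      omega
    · intro h
      simpa using h m hm

theorem valid_bit_list_py_eq (bit_list : List Int) (nbits : Int) :
    valid_bit_list_py bit_list nbits = valid_bit_list_py_alt bit_list nbits := by
  unfold valid_bit_list_py valid_bit_list_py_alt
  split_ifs with h
  · rfl
  · rw [validBitListLoop_eq_all]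
    set s := PySem.List.sorted bit_list (fun x => x) false with hsdef
    have hpw : s.Pairwise (· ≤ ·) := by
      simpa using PySem.List.sorted_pairwise (xs := bit_list) (key := fun x => x)
    have hperm : s.Perm bit_list := PySem.List.sorted_perm ..
    have hmem : ∀ x, x ∈ s ↔ x ∈ bit_list := fun x => hperm.mem_iff
    rw [Bool.eq_iff_iff]
    simp only [Bool.and_eq_true, List.all_eq_true, Bool.and_eq_true]
    rw [adjDistinctLoop_eq_chain, chain_ne_iff_nodup s hpw, last_lt_iff_forall s hpw nbits]
    constructor
    · intro hall
      have hnd : bit_list.Nodup := List.nodup_iff_count_eq_one.2 (fun a ha => by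
        have := (hall a ha).2; simpa using this)
      refine ⟨hperm.nodup_iff.2 hnd, fun x hx => by
        have := (hall x ((hmem x).1 hx)).1; simpa using this⟩
    · rintro ⟨hnd, hlt⟩ i hi
      have hnd' : bit_list.Nodup := hperm.nodup_iff.1 hnd
      refine ⟨by simpa using hlt i ((hmem i).2 hi), ?_⟩
      have := List.nodup_iff_count_eq_one.1 hnd' i hi
      simpa using this

-- ===== VERDICT (by name: the statement is the Claim_ definition above) =====
theorem valid_bit_list_py_spec : Claim_equal_valid_bit_list_py := by
  intro bit_list nbits _
  exact valid_bit_list_py_eq bit_list nbits
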